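-- pv_equiv track=rewrite | github.com/tkchafin/scripts | collapse_baits.py | seqCounterSimple
-- ===== SOURCE A (Python) =====
-- def seqCounterSimple(seq):
-- 	d = {}
-- 	d = {
-- 		'N':0,
-- 		'-':0,
-- 		'*':0
-- 	}
-- 	for c in seq:
-- 		if c in d:
-- 			d[c] += 1
-- 	return d
-- ===== SOURCE B (Python) =====
-- def seqCounterSimple(seq):
--     items = list(seq)
--     return {'N': items.count('N'), '-': items.count('-'), '*': items.count('*')}
-- ===== Notes on version B (the rewrite author's own statement) =====
-- stated objective: idiomatic
-- what changed: Replaces the single membership-filtered dict-update loop with a one-line dict literal built from three independent list.count scans.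
import Mathlib
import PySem

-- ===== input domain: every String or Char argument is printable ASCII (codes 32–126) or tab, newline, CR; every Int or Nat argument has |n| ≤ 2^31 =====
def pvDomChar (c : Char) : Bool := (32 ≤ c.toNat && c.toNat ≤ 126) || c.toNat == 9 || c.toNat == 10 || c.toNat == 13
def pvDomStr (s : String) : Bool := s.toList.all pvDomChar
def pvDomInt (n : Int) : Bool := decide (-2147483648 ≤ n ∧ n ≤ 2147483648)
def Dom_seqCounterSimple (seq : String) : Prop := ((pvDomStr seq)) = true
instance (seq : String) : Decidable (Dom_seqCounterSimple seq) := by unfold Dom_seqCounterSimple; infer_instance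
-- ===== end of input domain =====

-- B replaces A's single membership-filtered dict-update loop with a dict literal built from three independent count scans.

-- ===== PORT A =====
-- A: d = {'N':0,'-':0,'*':0}; for c in seq: if c in d: d[c] += 1; return d
def seqCounterSimple (seq : String) : List (String × Int) :=
  let d : PySem.Dict String Int := PySem.Dict.ofList [("N", 0), ("-", 0), ("*", 0)]
  let d := seq.toList.foldl
    (fun d c =>
      if d.contains (String.ofList [c]) then
        d.insert (String.ofList [c]) (d.getD (String.ofList [c]) 0 + 1)
      else d) d
  d.items

-- ===== PORT B =====
-- B: items = list(seq); return {'N': items.count('N'), '-': items.count('-'), '*': items.count('*')}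
def seqCounterSimple_alt (seq : String) : List (String × Int) :=
  let items := seq.toList
  [("N", (PySem.List.count items 'N' : Int)),
   ("-", (PySem.List.count items '-' : Int)),
   ("*", (PySem.List.count items '*' : Int))]

-- ===== PRECONDITION & SPEC =====
def Spec_seqCounterSimple (seq : String) (out : List (String × Int)) : Prop := out = seqCounterSimple_alt seq
instance (seq : String) (out : List (String × Int)) : Decidable (Spec_seqCounterSimple seq out) := by unfold Spec_seqCounterSimple; infer_instance

-- ===== CLAIM (what is proved, stated in full; the proofs are below) =====
def Claim_equal_seqCounterSimple : Prop := ∀ (seq : String), Dom_seqCounterSimple seq → Spec_seqCounterSimple seq (seqCounterSimple seq)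

-- ===== LEMMAS AND PROOFS =====

lemma pv_key_eq (t c : Char) : (String.ofList [c] = String.ofList [t]) ↔ c = t := by
  rw [String.ofList_inj]; simp

-- A's loop, with the three counters generalized: it adds the count of each key's char.
lemma pv_loop (l : List Char) (a b c : Int) :
    l.foldl
      (fun d c =>
        if PySem.Dict.contains d (String.ofList [c]) then
          d.insert (String.ofList [c]) (d.getD (String.ofList [c]) 0 + 1)
        else d)
      (PySem.Dict.mk [("N", a), ("-", b), ("*", c)]) =
    PySem.Dict.mk [("N", a + l.count 'N'), ("-", b + l.count '-'), ("*", c + l.count '*')] := by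
  induction l generalizing a b c with
  | nil => simp
  | cons h t ih =>
    simp only [List.foldl_cons]
    by_cases hN : h = 'N'
    · subst hN
      rw [show String.ofList ['N'] = "N" from by decide]
      rw [show (PySem.Dict.contains (PySem.Dict.mk [("N", a), ("-", b), ("*", c)]) "N") = true from by
            simp [PySem.Dict.contains],
          if_pos rfl,
          show (PySem.Dict.getD (PySem.Dict.mk [("N", a), ("-", b), ("*", c)]) "N" 0) = a from by
            simp [PySem.Dict.getD, PySem.Dict.get?],
          show (PySem.Dict.insert (PySem.Dict.mk [("N", a), ("-", b), ("*", c)]) "N" (a + 1)) =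
               PySem.Dict.mk [("N", a + 1), ("-", b), ("*", c)] from by
            simp [PySem.Dict.insert],
          ih]
      simp; ring
    · by_cases hD : h = '-'
      · subst hD
        rw [show String.ofList ['-'] = "-" from by decide]
        rw [show (PySem.Dict.contains (PySem.Dict.mk [("N", a), ("-", b), ("*", c)]) "-") = true from by
              simp [PySem.Dict.contains],
            if_pos rfl,
            show (PySem.Dict.getD (PySem.Dict.mk [("N", a), ("-", b), ("*", c)]) "-" 0) = b from by
              simp [PySem.Dict.getD, PySem.Dict.get?],
            show (PySem.Dict.insert (PySem.Dict.mk [("N", a), ("-", b), ("*", c)]) "-" (b + 1)) =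
                 PySem.Dict.mk [("N", a), ("-", b + 1), ("*", c)] from by
              simp [PySem.Dict.insert],
            ih]
        simp [hN]; ring
      · by_cases hS : h = '*'
        · subst hS
          rw [show String.ofList ['*'] = "*" from by decide]
          rw [show (PySem.Dict.contains (PySem.Dict.mk [("N", a), ("-", b), ("*", c)]) "*") = true from by
                simp [PySem.Dict.contains],
              if_pos rfl,
              show (PySem.Dict.getD (PySem.Dict.mk [("N", a), ("-", b), ("*", c)]) "*" 0) = c from by
                simp [PySem.Dict.getD, PySem.Dict.get?],
              show (PySem.Dict.insert (PySem.Dict.mk [("N", a), ("-", b), ("*", c)]) "*" (c + 1)) =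
                   PySem.Dict.mk [("N", a), ("-", b), ("*", c + 1)] from by
                simp [PySem.Dict.insert],
              ih]
          simp [hN, hD]; ring
        · have hcon : PySem.Dict.contains (PySem.Dict.mk [("N", a), ("-", b), ("*", c)])
              (String.ofList [h]) = false := by
            simp [PySem.Dict.contains]
            refine ⟨?_, ?_, ?_⟩ <;> intro he
            · exact hN ((pv_key_eq h 'N').mp (by rw [← he])).symm
            · exact hD ((pv_key_eq h '-').mp (by rw [← he])).symm
            · exact hS ((pv_key_eq h '*').mp (by rw [← he])).symm
          rw [hcon]
          simp only [Bool.false_eq_true, if_false]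
          rw [ih]
          simp [hN, hD, hS]

-- ===== VERDICT (by name: the statement is the Claim_ definition above) =====
theorem seqCounterSimple_spec : Claim_equal_seqCounterSimple := by
  intro seq _
  unfold Spec_seqCounterSimple seqCounterSimple seqCounterSimple_alt
  dsimp only
  rw [show (PySem.Dict.ofList [("N", (0:Int)), ("-", 0), ("*", 0)]) =
        PySem.Dict.mk [("N", 0), ("-", 0), ("*", 0)] from by decide]
  rw [pv_loop]
  simp [PySem.List.count_eq]
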